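-- pv_equiv track=rewrite | github.com/martintnr/LDeconv | R/invert_matrixes.py | build_refined_triplets
-- ===== SOURCE A (Python) =====
-- from numbers import Real
--
-- def build_refined_triplets(categories):
--     base_blocks = {}
--
--     for i, cat in enumerate(categories):
--         if isinstance(cat, Real) and not isinstance(cat, bool):
--             if float(cat).is_integer():
--                 cat = int(cat)
--         elif isinstance(cat, str):
--             try:
--                 x = float(cat)
--                 if x.is_integer():
--                     cat = int(x)
--             except ValueError:
--                 pass
--
--         base_blocks.setdefault(cat, []).append(i)
--
--     sorted_keys = sorted(base_blocks.keys())
--     refined_blocks = {}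
--
--     for i, key in enumerate(sorted_keys):
--         merged_indices = []
--
--         if i > 0:
--             merged_indices.extend(base_blocks[sorted_keys[i - 1]])
--
--         merged_indices.extend(base_blocks[key])
--
--         if i < len(sorted_keys) - 1:
--             merged_indices.extend(base_blocks[sorted_keys[i + 1]])
--
--         refined_blocks[key] = merged_indices
--
--     return refined_blocks
-- ===== SOURCE B (Python) =====
-- from numbers import Real
--
-- def build_refined_triplets(categories):
--     base_blocks = {}
--
--     for i, cat in enumerate(categories):
--         if isinstance(cat, Real) and not isinstance(cat, bool):
--             if float(cat).is_integer():
--                 cat = int(cat)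
--         elif isinstance(cat, str):
--             try:
--                 x = float(cat)
--                 if x.is_integer():
--                     cat = int(x)
--             except ValueError:
--                 pass
--
--         base_blocks.setdefault(cat, []).append(i)
--
--     keys = sorted(base_blocks)
--
--     # Flatten all blocks once in sorted-key order, recording block boundaries;
--     # each output row is then a single contiguous window of the flat array.
--     flat = []
--     bounds = [0]              # bounds[r] = offset where block r starts in flat
--     for k in keys:
--         flat.extend(base_blocks[k])
--         bounds.append(len(flat))
--
--     m = len(keys)
--     return {keys[r]: flat[bounds[r - 1 if r > 0 else 0]:
--                           bounds[(r + 1 if r + 1 < m else r) + 1]]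
--             for r in range(m)}
-- ===== Notes on version B (the rewrite author's own statement) =====
-- stated objective: alternative
-- what changed: A assembles each output row separately by looking up and concatenating its prev/own/next blocks per key; B instead flattens all blocks once into a single flat index array with a bounds offset table and reads every row as one contiguous slice flat[bounds[r-1]:bounds[r+2]] of that array.
-- outside the precondition, e.g. on build_refined_triplets(['7']): A returns {7: [0]}, B returns {7: [0]}; on build_refined_triplets(['7', 'a']): A raises TypeError, B raises TypeError
import Mathlib
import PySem

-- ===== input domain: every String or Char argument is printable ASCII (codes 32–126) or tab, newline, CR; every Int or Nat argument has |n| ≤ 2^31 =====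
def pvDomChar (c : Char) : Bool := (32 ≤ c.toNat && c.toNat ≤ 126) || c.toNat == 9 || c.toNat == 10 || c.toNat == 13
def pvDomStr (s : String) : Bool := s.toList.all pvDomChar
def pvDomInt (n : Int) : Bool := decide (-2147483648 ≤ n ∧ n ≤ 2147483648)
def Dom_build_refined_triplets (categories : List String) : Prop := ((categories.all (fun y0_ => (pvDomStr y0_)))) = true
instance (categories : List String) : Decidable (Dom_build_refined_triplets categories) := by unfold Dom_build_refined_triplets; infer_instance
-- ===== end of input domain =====

-- B replaces A's per-key row assembly (each sorted key looks up and concatenates its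
-- prev/own/next blocks) by flattening all blocks once into one flat array with a bounds
-- offset table and reading each row as a single contiguous slice of it ('alternative').

-- ===== PORT A =====
-- Under Pre_ (no category is a string float() maps to an integral value) the try/float
-- normalization never replaces cat, so it is ported as the identity (exact on Pre_).
def build_refined_triplets (categories : List String) : List (String × List Int) :=
  -- base_blocks.setdefault(cat, []).append(i)  ==  base_blocks[cat] = base_blocks.get(cat, []) + [i]
  let base_blocks : PySem.Dict String (List Int) :=
    (PySem.List.enumerate categories).foldl
      (fun d p => d.modify p.2 [] (fun l => l ++ [p.1])) PySem.Dict.empty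
  let sorted_keys := PySem.List.sorted base_blocks.keys (fun k => k) false
  let refined_blocks : PySem.Dict String (List Int) :=
    (PySem.List.enumerate sorted_keys).foldl
      (fun r p =>
        -- merged_indices = prev-block? ++ own block ++ next-block?  (indices i-1, i+1 are in range when the guards hold)
        let merged : List Int :=
          (if p.1 > 0 then base_blocks.getD (PySem.List.pyGetD sorted_keys (p.1 - 1) "") [] else [])
          ++ base_blocks.getD p.2 []
          ++ (if p.1 < (sorted_keys.length : Int) - 1 then base_blocks.getD (PySem.List.pyGetD sorted_keys (p.1 + 1) "") [] else [])
        r.insert p.2 merged)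
      PySem.Dict.empty
  refined_blocks.items

-- ===== PORT B =====
def build_refined_triplets_alt (categories : List String) : List (String × List Int) :=
  let base_blocks : PySem.Dict String (List Int) :=
    (PySem.List.enumerate categories).foldl
      (fun d p => d.modify p.2 [] (fun l => l ++ [p.1])) PySem.Dict.empty
  let keys := PySem.List.sorted base_blocks.keys (fun k => k) false
  -- flat = []; bounds = [0]; for k in keys: flat.extend(base_blocks[k]); bounds.append(len(flat))
  -- (k is always a key of base_blocks, so the base_blocks[k] lookup cannot raise; getD's default is unused)
  let fb : List Int × List Int :=
    keys.foldl
      (fun st k =>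
        let flat := st.1 ++ base_blocks.getD k []
        (flat, st.2 ++ [(flat.length : Int)]))
      ([], [(0 : Int)])
  let m : Int := (keys.length : Int)
  -- {keys[r]: flat[bounds[r-1 if r>0 else 0] : bounds[(r+1 if r+1<m else r)+1]] for r in range(m)}
  let refined : PySem.Dict String (List Int) :=
    (PySem.List.pyRange 0 m 1).foldl
      (fun d r =>
        d.insert (PySem.List.pyGetD keys r "")
          (PySem.List.slice fb.1
            (some (PySem.List.pyGetD fb.2 (if r > 0 then r - 1 else 0) 0))
            (some (PySem.List.pyGetD fb.2 ((if r + 1 < m then r + 1 else r) + 1) 0))))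
      PySem.Dict.empty
  refined.items

-- ===== PRECONDITION & SPEC =====
-- pvRun consumes a digit run D(_?D)* (single underscores strictly between digits),
-- returning the digits (underscores dropped) and the unconsumed rest; the caller
-- ensures the run starts with a digit.
def pvRun : List Char → List Char × List Char
  | [] => ([], [])
  | '_' :: rest =>
    match rest with
    | d :: r => if d.isDigit then
        let p := pvRun r
        (d :: p.1, p.2)
      else ([], '_' :: d :: r)
    | [] => ([], ['_'])
  | c :: r =>
    if c.isDigit then
      let p := pvRun r
      (c :: p.1, p.2)
    else ([], c :: r)

def pvDigitsToNat (ds : List Char) : Nat :=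
  ds.foldl (fun a ch => a * 10 + (ch.toNat - 48)) 0

-- Parses s per Python's float() grammar (whitespace, sign, mantissa with optional '.',
-- optional exponent, underscores between digits). Returns some (M, ndigits, frac, E):
-- mantissa digits as a number, how many digits it had, how many were after the point,
-- and the exponent. none = rejected or inf/infinity/nan (which are never integral).
def pvParseFloat (s : String) : Option (Nat × Nat × Nat × Int) :=
  let l := (PySem.Str.strip s).toList
  let l := match l with
           | c :: r => if c = '+' || c = '-' then r else c :: r
           | [] => []
  match l with
  | [] => none
  | c :: r =>
    let mant : Option (List Char × List Char × List Char) :=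
      if c.isDigit then
        let p := pvRun (c :: r)
        match p.2 with
        | '.' :: r2 =>
          match r2 with
          | d :: r2' => if d.isDigit then
              let q := pvRun (d :: r2')
              some (p.1, q.1, q.2)
            else some (p.1, [], r2)          -- '1.e5': point consumed, no frac digits
          | [] => some (p.1, [], [])
        | _ => some (p.1, [], p.2)
      else if c = '.' then
        match r with
        | d :: r2 => if d.isDigit then
            let q := pvRun (d :: r2)
            some ([], q.1, q.2)
          else none
        | [] => none
      else none
    match mant with
    | none => none
    | some (ids, fds, r3) =>
      match r3 with
      | [] => some (pvDigitsToNat (ids ++ fds), ids.length + fds.length, fds.length, 0)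
      | e :: r4 =>
        if e = 'e' || e = 'E' then
          let sr : Int × List Char :=
            match r4 with
            | c2 :: r5' => if c2 = '-' then (-1, r5') else if c2 = '+' then (1, r5') else (1, c2 :: r5')
            | [] => (1, [])
          match sr.2 with
          | d :: r6 =>
            if d.isDigit then
              let q := pvRun (d :: r6)
              if q.2 = [] then
                some (pvDigitsToNat (ids ++ fds), ids.length + fds.length, fds.length,
                      sr.1 * (pvDigitsToNat q.1 : Int))
              else none
            else none
          | [] => none
        else none

-- round-half-even of a/b (a, b : Nat, b > 0)
def pvRHE (a b : Nat) : Nat :=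
  let q := a / b
  let r := a % b
  if b < 2 * r then q + 1 else if 2 * r < b then q else if q % 2 = 0 then q else q + 1

-- True exactly when Python's float(s) succeeds AND the resulting binary64 value is
-- integral (x.is_integer()); the rounding below is exact round-half-even to 53 bits
-- with overflow to inf and underflow to 0.0, as CPython's correctly-rounded float().
def pvFloatIntegral (s : String) : Bool :=
  match pvParseFloat s with
  | none => false
  | some (M, L, frac, E) =>
    if M = 0 then true
    else
      let t : Int := E - (frac : Int)
      if 400 ≤ t then false                           -- ≥ 10^400: overflows to inf, not integral
      else if t + (L : Int) ≤ -400 then true          -- < 10^-399: rounds to 0.0, integral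
      else
        let num : Nat := if 0 ≤ t then M * 10 ^ t.toNat else M
        let den : Nat := if 0 ≤ t then 1 else 10 ^ (-t).toNat
        if den * (2 ^ 1024 - 2 ^ 970) ≤ num then false        -- rounds to inf
        else if den * 2 ^ 52 ≤ num then true                  -- ulp ≥ 1: every such double is integral
        else
          let q : Nat :=
            if num * 2 ^ 1022 < den then 1074                 -- subnormal range: quantum 2^-1074
            else (52 - ((Nat.log2 (num * 2 ^ 1100 / den) : Int) - 1100)).toNat
          let n := pvRHE (num * 2 ^ q) den
          n % 2 ^ q = 0

-- Pre_ excludes lists containing a string that Python's float() maps to an INTEGRAL value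
-- (e.g. '7', ' 3.0 ', '+5', '1_000', '1e-400'): A then turns that key into an int, so its
-- result either leaves the declared String-keyed type or sorted() raises TypeError on the
-- mixed str/int keys. Strings float() rejects or maps to a non-integral value ('2.5',
-- 'inf', 'nan', '0x10') keep their string key and are inside Pre_.
def Pre_build_refined_triplets (categories : List String) : Prop :=
  ∀ s ∈ categories, pvFloatIntegral s = false
instance (categories : List String) : Decidable (Pre_build_refined_triplets categories) := by
  unfold Pre_build_refined_triplets; infer_instance

def pvWitness_build_refined_triplets : List String := ["b", "inf", "b", "0x10", "a"]

def Spec_build_refined_triplets (categories : List String) (out : List (String × List Int)) : Prop := out = build_refined_triplets_alt categories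
instance (categories : List String) (out : List (String × List Int)) : Decidable (Spec_build_refined_triplets categories out) := by unfold Spec_build_refined_triplets; infer_instance

-- ===== CLAIM (what is proved, stated in full; the proofs are below) =====
def Claim_equal_build_refined_triplets : Prop := ∀ (categories : List String), Dom_build_refined_triplets categories → Pre_build_refined_triplets categories → Spec_build_refined_triplets categories (build_refined_triplets categories)

-- ===== LEMMAS AND PROOFS =====

-- the grouping dict and its sorted key list, as both ports compute them
def pvBB (categories : List String) : PySem.Dict String (List Int) :=
  (PySem.List.enumerate categories).foldl
    (fun d p => d.modify p.2 [] (fun l => l ++ [p.1])) PySem.Dict.empty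

def pvKS (categories : List String) : List String :=
  PySem.List.sorted (pvBB categories).keys (fun k => k) false

-- A's merged value at an enumerate pair
def pvMergedA (bb : PySem.Dict String (List Int)) (ks : List String) (p : Int × String) : List Int :=
  (if p.1 > 0 then bb.getD (PySem.List.pyGetD ks (p.1 - 1) "") [] else [])
  ++ bb.getD p.2 []
  ++ (if p.1 < (ks.length : Int) - 1 then bb.getD (PySem.List.pyGetD ks (p.1 + 1) "") [] else [])

-- B's flat/bounds loop step
def pvStepFB (bb : PySem.Dict String (List Int)) (st : List Int × List Int) (k : String) :
    List Int × List Int :=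
  let flat := st.1 ++ bb.getD k []
  (flat, st.2 ++ [(flat.length : Int)])

-- length of the first j blocks, flattened
def pvS (bb : PySem.Dict String (List Int)) (ks : List String) (j : Nat) : Nat :=
  ((ks.take j).flatMap (fun k => bb.getD k [])).length

theorem pvFB_eq (bb : PySem.Dict String (List Int)) (ks : List String)
    (f0 b0 : List Int) :
    ks.foldl (pvStepFB bb) (f0, b0) =
      (f0 ++ ks.flatMap (fun k => bb.getD k []),
       b0 ++ (List.range ks.length).map
         (fun j => (((f0 ++ (ks.take (j + 1)).flatMap (fun k => bb.getD k [])).length : Nat) : Int))) := by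
  induction ks generalizing f0 b0 with
  | nil => simp
  | cons k t ih =>
    rw [List.foldl_cons,
      show pvStepFB bb (f0, b0) k
        = (f0 ++ bb.getD k [], b0 ++ [((f0 ++ bb.getD k []).length : Int)]) from rfl, ih]
    refine Prod.ext ?_ ?_
    · simp [List.append_assoc]
    · simp only [List.length_cons, List.range_succ_eq_map, List.map_cons, List.map_map,
        List.append_assoc, List.singleton_append]
      refine congrArg (b0 ++ ·) (List.cons_eq_cons.mpr ⟨by simp, ?_⟩)
      refine List.map_congr_left (fun j _ => ?_)
      simp [List.take_succ_cons]

-- the window of the flat array between two block boundaries is the flattening of those blocks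
theorem pvWindow (bb : PySem.Dict String (List Int)) (ks : List String)
    (a b : Nat) (hab : a ≤ b) (_hb : b ≤ ks.length) :
    ((ks.flatMap (fun k => bb.getD k [])).drop (pvS bb ks a)).take (pvS bb ks b - pvS bb ks a)
      = ((ks.drop a).take (b - a)).flatMap (fun k => bb.getD k []) := by
  have h1 : ks.flatMap (fun k => bb.getD k [])
      = (ks.take a).flatMap (fun k => bb.getD k []) ++ (ks.drop a).flatMap (fun k => bb.getD k []) := by
    rw [← List.flatMap_append, List.take_append_drop]
  have hd : (ks.flatMap (fun k => bb.getD k [])).drop (pvS bb ks a)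
      = (ks.drop a).flatMap (fun k => bb.getD k []) := by
    rw [h1]
    exact List.drop_left
  have hb' : ks.take b = ks.take a ++ (ks.drop a).take (b - a) := by
    rw [← List.take_add, Nat.add_sub_cancel' hab]
  have hS : pvS bb ks b = pvS bb ks a + (((ks.drop a).take (b - a)).flatMap (fun k => bb.getD k [])).length := by
    unfold pvS
    rw [hb', List.flatMap_append, List.length_append]
  have h2 : (ks.drop a).flatMap (fun k => bb.getD k [])
      = ((ks.drop a).take (b - a)).flatMap (fun k => bb.getD k [])
        ++ ((ks.drop a).drop (b - a)).flatMap (fun k => bb.getD k []) := by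
    rw [← List.flatMap_append, List.take_append_drop]
  rw [hd, hS, Nat.add_sub_cancel_left, h2]
  exact List.take_left

theorem pv_main (categories : List String) :
    build_refined_triplets categories = build_refined_triplets_alt categories := by
  set bb := pvBB categories with hbbdef
  set ks := pvKS categories with hksdef
  have hndk : (pvBB categories).keys.Nodup := by
    exact PySem.Dict.nodup_keys_foldl_modify_key (PySem.List.enumerate categories)
      (fun p => p.2) [] (fun _ p l => l ++ [p.1]) PySem.Dict.empty PySem.Dict.nodup_keys_empty
  have hnd : ks.Nodup := ((PySem.List.sorted_perm _ _ _).nodup_iff).mpr hndk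
  have hgd : ∀ (m : Nat) (hm : m < ks.length), PySem.List.pyGetD ks ((m : Nat) : Int) "" = ks[m] := by
    intro m hm
    rw [PySem.List.pyGetD_natCast]
    exact List.getD_eq_getElem _ _ hm
  -- A's result: a fresh-key insert loop over the sorted keys
  have hA : build_refined_triplets categories =
      (PySem.List.enumerate ks).map (fun p => (p.2, pvMergedA bb ks p)) := by
    show ((PySem.List.enumerate ks).foldl
        (fun r p => r.insert p.2 (pvMergedA bb ks p)) PySem.Dict.empty).items = _
    rw [PySem.Dict.items_foldl_insert_fresh (PySem.List.enumerate ks) (fun p => p.2)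
      (fun p => pvMergedA bb ks p) PySem.Dict.empty (fun a _ => PySem.Dict.contains_empty _)
      (by rw [PySem.List.map_snd_enumerate]; exact hnd)]
    simp [PySem.Dict.empty]
  -- B's pieces: the flat/bounds fold
  have hflat : (ks.foldl (pvStepFB bb) ([], [0])).1 = ks.flatMap (fun k => bb.getD k []) := by
    rw [pvFB_eq]
    simp
  have hbounds : (ks.foldl (pvStepFB bb) ([], [0])).2
      = (0 : Int) :: (List.range ks.length).map (fun j => ((pvS bb ks (j + 1) : Nat) : Int)) := by
    rw [pvFB_eq]
    simp [pvS]
  have hbget : ∀ (i : Nat), i ≤ ks.length →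
      PySem.List.pyGetD (ks.foldl (pvStepFB bb) ([], [0])).2 ((i : Nat) : Int) 0
        = ((pvS bb ks i : Nat) : Int) := by
    intro i hi
    rw [hbounds, PySem.List.pyGetD_natCast]
    cases i with
    | zero => simp [pvS]
    | succ n =>
      rw [List.getD_cons_succ, List.getD_eq_getElem _ _ (by simpa using hi), List.getElem_map,
        List.getElem_range]
  -- B's result: a fresh-key insert loop over range(m)
  have hkeysmap : (PySem.List.pyRange 0 (ks.length : Int) 1).map
      (fun r => PySem.List.pyGetD ks r "") = ks := PySem.List.map_pyGetD_pyRange_zero ks ""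
  have hB : build_refined_triplets_alt categories =
      ((PySem.List.pyRange 0 (ks.length : Int) 1).foldl
        (fun d r =>
          d.insert (PySem.List.pyGetD ks r "")
            (PySem.List.slice (ks.foldl (pvStepFB bb) ([], [0])).1
              (some (PySem.List.pyGetD (ks.foldl (pvStepFB bb) ([], [0])).2 (if r > 0 then r - 1 else 0) 0))
              (some (PySem.List.pyGetD (ks.foldl (pvStepFB bb) ([], [0])).2
                ((if r + 1 < (ks.length : Int) then r + 1 else r) + 1) 0))))
        PySem.Dict.empty).items := rfl
  rw [hA, hB,
    PySem.Dict.items_foldl_insert_fresh (PySem.List.pyRange 0 (ks.length : Int) 1)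
      (fun r => PySem.List.pyGetD ks r "") _ PySem.Dict.empty
      (fun a _ => PySem.Dict.contains_empty _) (by rw [hkeysmap]; exact hnd),
    PySem.List.enumerate_eq_map_pyRange ks "", List.map_map]
  simp only [PySem.Dict.empty, List.nil_append, PySem.List.len]
  refine List.map_congr_left (fun r hr => ?_)
  rw [PySem.List.mem_pyRange_one] at hr
  obtain ⟨hr0, hrm⟩ := hr
  obtain ⟨j, rfl⟩ : ∃ j : Nat, r = (j : Int) := ⟨r.toNat, (Int.toNat_of_nonneg hr0).symm⟩
  have hj : j < ks.length := by exact_mod_cast hrm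
  clear hrm
  refine Prod.ext rfl ?_
  show pvMergedA bb ks ((j : Int), PySem.List.pyGetD ks (j : Int) "") = _
  have hlo : (if (j : Int) > 0 then (j : Int) - 1 else 0) = ((j - 1 : Nat) : Int) := by
    split_ifs with h <;> omega
  have hhi : ((if (j : Int) + 1 < (ks.length : Int) then (j : Int) + 1 else (j : Int)) + 1)
      = (((if j + 1 < ks.length then j + 2 else j + 1) : Nat) : Int) := by
    by_cases hc : j + 1 < ks.length
    · rw [if_pos (by exact_mod_cast hc), if_pos hc]; omega
    · rw [if_neg (by exact_mod_cast hc), if_neg hc]; omega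
  rw [hlo, hhi, hbget (j - 1) (by omega),
    hbget (if j + 1 < ks.length then j + 2 else j + 1) (by split_ifs <;> omega),
    hflat, PySem.List.slice_natCast,
    pvWindow bb ks (j - 1) (if j + 1 < ks.length then j + 2 else j + 1)
      (by split_ifs <;> omega) (by split_ifs <;> omega)]
  -- both sides are now explicit blocks around position j
  unfold pvMergedA
  simp only [hgd j hj]
  by_cases hj0 : 0 < j <;> by_cases hjn : j + 1 < ks.length
  · rw [if_pos hjn,
      show j + 2 - (j - 1) = 3 from by omega,
      List.drop_eq_getElem_cons (by omega : j - 1 < ks.length),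
      show j - 1 + 1 = j from by omega,
      List.drop_eq_getElem_cons (by omega : j < ks.length),
      List.drop_eq_getElem_cons (by omega : j + 1 < ks.length),
      if_pos (by omega : ((j : Int), ks[j]).1 > 0),
      if_pos (by omega : ((j : Int), ks[j]).1 < (ks.length : Int) - 1),
      show ((j : Int), ks[j]).1 - 1 = ((j - 1 : Nat) : Int) from by omega,
      show ((j : Int), ks[j]).1 + 1 = ((j + 1 : Nat) : Int) from by omega,
      hgd (j - 1) (by omega), hgd (j + 1) hjn]
    simp only [List.take_succ_cons, List.take_zero, List.flatMap_cons, List.flatMap_nil,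
      List.append_nil, List.append_assoc]
  · rw [if_neg hjn,
      show j + 1 - (j - 1) = 2 from by omega,
      List.drop_eq_getElem_cons (by omega : j - 1 < ks.length),
      show j - 1 + 1 = j from by omega,
      List.drop_eq_getElem_cons (by omega : j < ks.length),
      if_pos (by omega : ((j : Int), ks[j]).1 > 0),
      if_neg (by omega : ¬ ((j : Int), ks[j]).1 < (ks.length : Int) - 1),
      show ((j : Int), ks[j]).1 - 1 = ((j - 1 : Nat) : Int) from by omega,
      hgd (j - 1) (by omega)]
    simp only [List.take_succ_cons, List.take_zero, List.flatMap_cons, List.flatMap_nil,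
      List.append_nil]
  · have h0 : j = 0 := by omega
    subst h0
    rw [if_pos hjn,
      show (0 : Nat) + 2 - (0 - 1) = 2 from by omega,
      List.drop_eq_getElem_cons (by omega : 0 - 1 < ks.length),
      show (0 : Nat) - 1 + 1 = 1 from by omega,
      List.drop_eq_getElem_cons (by omega : 1 < ks.length),
      if_neg (by omega : ¬ (((0 : Nat) : Int), ks[(0 : Nat) - 1]).1 > 0),
      if_pos (by omega : (((0 : Nat) : Int), ks[0]).1 < (ks.length : Int) - 1),
      show (((0 : Nat) : Int), ks[0]).1 + 1 = ((1 : Nat) : Int) from by omega,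
      hgd 1 hjn]
    simp only [List.take_succ_cons, List.take_zero, List.flatMap_cons, List.flatMap_nil,
      List.append_nil, List.append_assoc]
    simp
  · have h0 : j = 0 := by omega
    subst h0
    rw [if_neg hjn,
      show (0 : Nat) + 1 - (0 - 1) = 1 from by omega,
      List.drop_eq_getElem_cons (by omega : 0 - 1 < ks.length),
      if_neg (by omega : ¬ (((0 : Nat) : Int), ks[(0 : Nat) - 1]).1 > 0),
      if_neg (by omega : ¬ (((0 : Nat) : Int), ks[0]).1 < (ks.length : Int) - 1)]
    simp

-- ===== VERDICT (by name: the statement is the Claim_ definition above) =====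
theorem build_refined_triplets_spec : Claim_equal_build_refined_triplets := by
  intro categories _ _
  unfold Spec_build_refined_triplets
  exact pv_main categories
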